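-- pv_equiv track=rewrite | github.com/Sunfl4wer/mfcs-2022-final-assignment | imlpa.py | findSeedNodes
-- ===== SOURCE A (Python) =====
-- import copy
--
-- def metadata(ug):
--     nodes = []
--     deg = {}
--     for e in ug:
--         nodes.append(e)
--         deg[e] = len(ug[e])
--     return nodes, deg
--
-- def findSeedNodes(ug):
--     copiedUG = copy.deepcopy(ug)
--     candidates, deg = metadata(copiedUG)
--     seedNodes = []
--     while len(candidates) != 0:
--         highestDegreeNode = max(deg, key=deg.get)
--         seedNodes.append(highestDegreeNode)
--         neighbors = copiedUG.pop(highestDegreeNode)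
--         neighbors.append(highestDegreeNode)
--         removeNodes = neighbors
--         for removedNode in removeNodes:
--             if removedNode in copiedUG:
--                 copiedUG.pop(removedNode)
--             for node in copiedUG:
--                 if removedNode in copiedUG[node]:
--                     copiedUG[node].remove(removedNode)
--         candidates, deg = metadata(copiedUG)
--     return seedNodes
-- ===== SOURCE B (Python) =====
-- def findSeedNodes(ug):
--     # Static per-node data (never mutated): insertion-ordered rows of
--     # (node, counter of the ORIGINAL adjacency list, original degree).
--     rows = []
--     for u in ug:
--         c = {}
--         for v in ug[u]:
--             c[v] = c.get(v, 0) + 1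
--         rows.append((u, c, len(ug[u])))
--     # M is a global removal-cap multiset: M[v] = total copies of v removed so
--     # far.  Sequential capped removals of v compose to a single cap, so the
--     # remaining count of v in node w's list is max(0, c_w[v] - M[v]) and the
--     # current degree of w is len_w - sum_v min(M[v], c_w[v]).  No adjacency
--     # structure is ever updated.
--     M = {}
--     alive = rows
--     seeds = []
--     while alive:
--         best = max(alive, key=lambda r: r[2] - sum(min(M.get(k, 0), m) for k, m in r[1].items()))
--         u, cu, _ = best
--         seeds.append(u)
--         newM = dict(M)
--         for k, m in cu.items():
--             if m > newM.get(k, 0):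
--                 newM[k] = m
--         newM[u] = newM.get(u, 0) + 1
--         alive = [r for r in alive if r[0] != u and cu.get(r[0], 0) <= M.get(r[0], 0)]
--         M = newM
--     return seeds
-- ===== Notes on version B (the rewrite author's own statement) =====
-- stated objective: alternative
-- what changed: B never deletes anything from adjacency data: it keeps immutable per-node counters and folds all of A's capped occurrence-removals into one global removal-cap multiset M (sequential capped removals of v compose to a single cap), computing each node's current degree on the fly as len - sum(min(M[v],c[v])) and survivorship by comparing c_u[w] with M[w], where A eagerly pops keys and list.remove's occurrences from every remaining adjacency list each round.
import Mathlib
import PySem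

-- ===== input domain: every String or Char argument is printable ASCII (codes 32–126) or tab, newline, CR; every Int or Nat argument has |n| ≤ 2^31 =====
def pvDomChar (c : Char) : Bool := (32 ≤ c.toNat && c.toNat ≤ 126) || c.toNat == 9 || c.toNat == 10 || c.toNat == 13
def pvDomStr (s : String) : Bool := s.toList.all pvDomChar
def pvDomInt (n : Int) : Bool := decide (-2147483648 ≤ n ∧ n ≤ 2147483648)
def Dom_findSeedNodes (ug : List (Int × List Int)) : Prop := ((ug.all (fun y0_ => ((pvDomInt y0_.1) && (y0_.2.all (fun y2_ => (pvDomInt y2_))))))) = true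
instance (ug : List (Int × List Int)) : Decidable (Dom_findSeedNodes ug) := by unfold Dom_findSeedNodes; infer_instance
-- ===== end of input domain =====

-- B replaces A's eager deletion (pop keys, list.remove occurrences from every
-- remaining adjacency list, rebuild metadata each round) by immutable per-node
-- counters plus one global removal-cap multiset M, computing degrees and
-- survivorship from M on the fly (return values proved equal; neither port mutates its argument).

-- shared helper lemma (cited by both ports' decreasing_by): a fold that always
-- keeps either the accumulator or the element stays inside the list
theorem foldPick_mem {α : Type} (f : α → α → α) (hf : ∀ a b, f a b = a ∨ f a b = b) :
    ∀ (l : List α) (a : α), l.foldl f a = a ∨ l.foldl f a ∈ l := by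
  intro l
  induction l with
  | nil => intro a; exact Or.inl rfl
  | cons x xs ih =>
    intro a
    simp only [List.foldl_cons]
    rcases ih (f a x) with h' | h'
    · rcases hf a x with h | h
      · exact Or.inl (h'.trans h)
      · refine Or.inr ?_; rw [h', h]; exact List.mem_cons_self
    · exact Or.inr (List.mem_cons_of_mem _ h')

-- ===== PORT A =====
-- `if removedNode in lst: lst.remove(removedNode)` (drop the first occurrence, if any)
def remOneA (l : List Int) (r : Int) : List Int :=
  if l.contains r then (PySem.List.remove? l r).getD l else l

-- one iteration of `for removedNode in removeNodes:`: pop the key if present, then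
-- drop one occurrence of removedNode from every remaining adjacency list
def stepA (d : PySem.Dict Int (List Int)) (r : Int) : PySem.Dict Int (List Int) :=
  let d1 := if d.contains r then d.erase r else d
  PySem.Dict.mk (d1.items.map (fun p => (p.1, remOneA p.2 r)))

-- metadata(ug): the key list and the degree dict, built in one pass over the dict
def metadataA (d : PySem.Dict Int (List Int)) : List Int × PySem.Dict Int Int :=
  d.items.foldl (fun nd p => (nd.1 ++ [p.1], nd.2.insert p.1 ((p.2.length : Int)))) ([], PySem.Dict.empty)

-- max(deg, key=deg.get): first key of maximal value ([] is unreachable: the loop guard ensures nonempty)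
def pyMaxByVal : List (Int × Int) → Int
  | [] => 0
  | p :: rest => (rest.foldl (fun best q => if q.2 > best.2 then q else best) p).1

-- the whole body of one `while` iteration after the argmax: pop u, append u to its
-- neighbour list, and run the removal loop
def roundA (d : PySem.Dict Int (List Int)) (u : Int) : PySem.Dict Int (List Int) :=
  ((d.getD u []) ++ [u]).foldl stepA (d.erase u)

-- ==== lemmas cited by goA's decreasing_by (the port needs them for termination) ====
theorem stepA_items (d : PySem.Dict Int (List Int)) (r : Int) :
    (stepA d r).items
      = (d.items.filter (fun p => !(p.1 == r))).map (fun p => (p.1, remOneA p.2 r)) := by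
  unfold stepA
  by_cases hc : d.contains r = true
  · simp only [hc, if_pos]
    rfl
  · simp only [hc, if_neg, Bool.false_eq_true, not_false_iff]
    have : d.items.filter (fun p => !(p.1 == r)) = d.items := by
      apply List.filter_eq_self.mpr
      intro p hp
      have := PySem.Dict.contains_iff_mem_keys d r
      simp only [PySem.Dict.contains] at hc
      have hnp : ¬(p.1 == r) = true := by
        intro hpr
        exact hc (List.any_eq_true.mpr ⟨p, hp, hpr⟩)
      simp [hnp]
    rw [this]

theorem foldA_items (R : List Int) :
    ∀ (d : PySem.Dict Int (List Int)),
      (R.foldl stepA d).items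
        = (d.items.filter (fun p => !(R.contains p.1))).map (fun p => (p.1, R.foldl remOneA p.2)) := by
  induction R with
  | nil =>
    intro d
    simp
  | cons r R ih =>
    intro d
    simp only [List.foldl_cons]
    rw [ih (stepA d r), stepA_items d r, List.filter_map, List.map_map]
    congr 1
    rw [List.filter_filter]
    apply List.filter_congr
    intro p _
    simp only [Function.comp, List.contains_cons]
    cases hpr : (p.1 == r) <;> cases hR : R.contains p.1 <;> simp

theorem metadataA_eq (d : PySem.Dict Int (List Int)) :
    metadataA d
      = (d.keys, d.items.foldl (fun dd p => dd.insert p.1 ((p.2.length : Int))) PySem.Dict.empty) := by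
  unfold metadataA
  have h := PySem.List.foldl_prod_mk (fun (nd : List Int) (p : Int × List Int) => nd ++ [p.1])
      (fun (dd : PySem.Dict Int Int) (p : Int × List Int) => dd.insert p.1 ((p.2.length : Int)))
      d.items [] PySem.Dict.empty
  refine h.trans ?_
  rw [PySem.List.foldl_append_singleton_eq_map]
  rfl

theorem pyMaxByVal_mem (items : List (Int × Int)) (_h : items ≠ []) :
    pyMaxByVal items ∈ items.map Prod.fst := by
  match items with
  | [] => exact absurd rfl _h
  | p :: rest =>
    have := foldPick_mem (fun best q => if q.2 > best.2 then q else best)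
      (fun a b => by by_cases hab : b.2 > a.2 <;> simp [hab]) rest p
    simp only [pyMaxByVal]
    rcases this with h' | h'
    · rw [h']; exact List.mem_map_of_mem (List.mem_cons_self)
    · exact List.mem_map_of_mem (List.mem_cons_of_mem _ h')

theorem argmaxA_mem_keys (d : PySem.Dict Int (List Int)) (h : (metadataA d).1 ≠ []) :
    pyMaxByVal (metadataA d).2.items ∈ d.keys := by
  rw [metadataA_eq] at h ⊢
  have hkeys : (d.items.foldl (fun dd p => dd.insert p.1 ((p.2.length : Int))) PySem.Dict.empty).keys
      = PySem.Set.ofList d.keys := by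
    rw [PySem.Dict.keys_foldl_insert_key d.items Prod.fst
          (fun _ p => ((p.2.length : Int))) PySem.Dict.empty]
    rw [show (PySem.Dict.empty : PySem.Dict Int Int).keys = [] from rfl]
    rw [PySem.Set.update_nil_left]
    rfl
  have hne : (d.items.foldl (fun dd p => dd.insert p.1 ((p.2.length : Int))) PySem.Dict.empty).items ≠ [] := by
    intro hnil
    have : PySem.Set.ofList d.keys = [] := by
      rw [← hkeys]; simp [PySem.Dict.keys, hnil]
    rcases List.exists_mem_of_ne_nil d.keys h with ⟨k, hk⟩
    rw [← PySem.Set.mem_ofList (xs := d.keys)] at hk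
    rw [this] at hk
    exact absurd hk (List.not_mem_nil)
  have := pyMaxByVal_mem _ hne
  rw [← PySem.Dict.keys] at this
  rw [hkeys] at this
  exact (PySem.Set.mem_ofList _ _).mp this

theorem roundA_lt (d : PySem.Dict Int (List Int)) (u : Int) (hu : u ∈ d.keys) :
    (roundA d u).items.length < d.items.length := by
  unfold roundA
  rw [foldA_items]
  rw [List.length_map]
  have herase : (d.erase u).items = d.items.filter (fun p => !(p.1 == u)) := rfl
  calc (List.filter _ (d.erase u).items).length
      ≤ (d.erase u).items.length := List.length_filter_le _ _
    _ < d.items.length := by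
        rw [herase]
        apply List.length_filter_lt_length_iff_exists.mpr
        rcases List.mem_map.mp hu with ⟨p, hp, hpu⟩
        exact ⟨p, hp, by simp [hpu]⟩

-- the while loop of findSeedNodes (candidates/deg recomputed at the top of each round)
def goA (d : PySem.Dict Int (List Int)) : List Int :=
  if h : (metadataA d).1 = [] then []
  else
    pyMaxByVal (metadataA d).2.items :: goA (roundA d (pyMaxByVal (metadataA d).2.items))
termination_by d.items.length
decreasing_by
  exact roundA_lt d _ (argmaxA_mem_keys d h)

def findSeedNodes (ug : List (Int × List Int)) : List Int :=
  goA (PySem.Dict.ofList ug)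

-- ===== PORT B =====
-- a static row (node, counter of the ORIGINAL adjacency list, original degree)
def rowOf (p : Int × List Int) : Int × PySem.Dict Int Int × Int :=
  (p.1, p.2.foldl (fun c v => c.insert v (c.getD v 0 + 1)) PySem.Dict.empty, (p.2.length : Int))

-- current degree under the removal-cap multiset M: len - sum(min(M[k], m))
def degOf (M : PySem.Dict Int Int) (r : Int × PySem.Dict Int Int × Int) : Int :=
  r.2.2 - (r.2.1.items.map (fun p => min (M.getD p.1 0) p.2)).sum

-- `max(alive, key=deg)`: first row of maximal current degree
def bestOf (M : PySem.Dict Int Int) (r0 : Int × PySem.Dict Int Int × Int)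
    (rest : List (Int × PySem.Dict Int Int × Int)) : Int × PySem.Dict Int Int × Int :=
  rest.foldl (fun b r => if degOf M r > degOf M b then r else b) r0

-- `newM = max-merge of M with cu; newM[u] += 1`
def mergeM (M : PySem.Dict Int Int) (u : Int) (cu : PySem.Dict Int Int) : PySem.Dict Int Int :=
  PySem.Dict.insert
    (cu.items.foldl (fun m p => if p.2 > m.getD p.1 0 then m.insert p.1 p.2 else m) M) u
    ((cu.items.foldl (fun m p => if p.2 > m.getD p.1 0 then m.insert p.1 p.2 else m) M).getD u 0 + 1)

-- the while loop: pick the first max-degree row, update M, filter the survivors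
def goB : List (Int × PySem.Dict Int Int × Int) → PySem.Dict Int Int → List Int
  | [], _ => []
  | r0 :: rest, M =>
    (bestOf M r0 rest).1 ::
      goB ((r0 :: rest).filter
            (fun r => r.1 != (bestOf M r0 rest).1
              && decide ((bestOf M r0 rest).2.1.getD r.1 0 ≤ M.getD r.1 0)))
          (mergeM M (bestOf M r0 rest).1 (bestOf M r0 rest).2.1)
termination_by rows _ => rows.length
decreasing_by
  have hbest : bestOf M r0 rest = r0 ∨ bestOf M r0 rest ∈ rest :=
    foldPick_mem _ (fun a b => by by_cases h : degOf M b > degOf M a <;> simp [h]) rest r0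
  have hmem : bestOf M r0 rest ∈ r0 :: rest := by
    rcases hbest with h | h
    · rw [h]; exact List.mem_cons_self ..
    · exact List.mem_cons_of_mem _ h
  exact List.length_filter_lt_length_iff_exists.mpr ⟨_, hmem, by simp⟩

def findSeedNodes_alt (ug : List (Int × List Int)) : List Int :=
  goB ((PySem.Dict.ofList ug).items.map rowOf) PySem.Dict.empty

-- ===== PRECONDITION & SPEC =====
def Spec_findSeedNodes (ug : List (Int × List Int)) (out : List Int) : Prop := out = findSeedNodes_alt ug
instance (ug : List (Int × List Int)) (out : List Int) : Decidable (Spec_findSeedNodes ug out) := by unfold Spec_findSeedNodes; infer_instance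

-- ===== CLAIM (what is proved, stated in full; the proofs are below) =====
def Claim_equal_findSeedNodes : Prop := ∀ (ug : List (Int × List Int)), Dom_findSeedNodes ug → Spec_findSeedNodes ug (findSeedNodes ug)

-- ===== LEMMAS AND PROOFS =====

-- static facts about one row
def RowInv (row : Int × PySem.Dict Int Int × Int) : Prop :=
  row.2.1.keys.Nodup ∧ (∀ v : Int, 0 ≤ row.2.1.getD v 0) ∧
    row.2.2 = (row.2.1.items.map Prod.snd).sum

-- the simulation relation: an entry (k, current list) of A's dict against a static
-- row of B under the current cap multiset M
def RelM (M : PySem.Dict Int Int) (p : Int × List Int) (row : Int × PySem.Dict Int Int × Int) : Prop :=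
  row.1 = p.1 ∧ RowInv row ∧
    ∀ v : Int, (p.2.count v : Int) = row.2.1.getD v 0 - min (M.getD v 0) (row.2.1.getD v 0)

def MNonneg (M : PySem.Dict Int Int) : Prop := ∀ v : Int, 0 ≤ M.getD v 0

-- ---- list-level facts about A's removal loop ----
theorem count_remOneA (l : List Int) (r v : Int) :
    (remOneA l r).count v = l.count v - if r == v then 1 else 0 := by
  unfold remOneA
  by_cases hr : l.contains r = true
  · have hmem : r ∈ l := by simpa using hr
    rw [if_pos hr, PySem.List.remove?_eq_some_erase l r hmem]
    simp [List.count_erase]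
  · have hmem : r ∉ l := by simpa using hr
    rw [if_neg (by simpa using hr)]
    have h0 : l.count r = 0 := List.count_eq_zero.mpr hmem
    by_cases hv : r = v
    · subst hv; simp [h0]
    · simp only [beq_iff_eq, hv, if_false]
      omega

theorem count_foldG (R : List Int) :
    ∀ (l : List Int) (v : Int), (R.foldl remOneA l).count v = l.count v - R.count v := by
  induction R with
  | nil => simp
  | cons r R ih =>
    intro l v
    simp only [List.foldl_cons]
    rw [ih, count_remOneA, List.count_cons]
    simp only [beq_iff_eq]
    split_ifs <;> omega

theorem len_sum :
    ∀ (m T : List Int), T.Nodup → (∀ x ∈ m, x ∈ T) →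
      (m.length : Int) = (T.map (fun v => (m.count v : Int))).sum := by
  intro m
  induction m with
  | nil => intro T _ _; simp
  | cons x m ih =>
    intro T hT hsub
    have hx : x ∈ T := hsub x List.mem_cons_self
    have hm : ∀ y ∈ m, y ∈ T := fun y hy => hsub y (List.mem_cons_of_mem _ hy)
    have h1 : T.map (fun v => (((x :: m).count v : Nat) : Int))
        = T.map (fun v => (m.count v : Int) + (if (fun v => v == x) v = true then 1 else 0)) := by
      apply List.map_congr_left
      intro v _
      rw [List.count_cons]
      by_cases hvx : x = v
      · subst hvx; simp
      · simp [hvx, Ne.symm hvx]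
    rw [h1, PySem.List.sum_map_add_int, PySem.List.sum_map_ite_one_zero (fun v => v == x) T]
    have hc1 : T.countP (fun v => v == x) = 1 := by
      rw [show T.countP (fun v => v == x) = T.count x from rfl]
      exact List.count_eq_one_of_mem hT hx
    rw [← ih T hT hm, hc1]
    simp only [List.length_cons]
    push_cast
    ring

theorem sum_map_sub {α : Type} (l : List α) (f g : α → Int) :
    (l.map (fun x => f x - g x)).sum = (l.map f).sum - (l.map g).sum := by
  induction l with
  | nil => simp
  | cons t T ih => simp [ih]; ring

-- a counter key not in the dict yields 0
theorem getD_zero_of_not_mem_keys (c : PySem.Dict Int Int) (v : Int) (h : v ∉ c.keys) :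
    c.getD v 0 = 0 := by
  apply PySem.Dict.getD_of_not_contains
  cases hc : c.contains v
  · rfl
  · exact absurd ((PySem.Dict.contains_iff_mem_keys c v).mp hc) h

-- the support of the current list is inside the counter's keys
theorem support_sub (M : PySem.Dict Int Int) (p : Int × List Int)
    (row : Int × PySem.Dict Int Int × Int) (hM : MNonneg M) (h : RelM M p row) :
    ∀ x ∈ p.2, x ∈ row.2.1.keys := by
  intro x hx
  have hxc : 0 < p.2.count x := List.count_pos_iff.mpr hx
  have hcnt := h.2.2 x
  by_contra hmem
  rw [getD_zero_of_not_mem_keys row.2.1 x hmem] at hcnt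
  have := hM x
  omega

-- the current degree is a pure function of the static row and M
theorem deg_eq (M : PySem.Dict Int Int) (p : Int × List Int)
    (row : Int × PySem.Dict Int Int × Int) (hM : MNonneg M) (h : RelM M p row) :
    (p.2.length : Int) = degOf M row := by
  obtain ⟨h1, ⟨hnd, hpos, hlen⟩, hcnt⟩ := h
  have hL := len_sum p.2 row.2.1.keys hnd (support_sub M p row hM ⟨h1, ⟨hnd, hpos, hlen⟩, hcnt⟩)
  have hkeys : row.2.1.keys.map (fun v => (p.2.count v : Int))
      = row.2.1.items.map (fun q => (p.2.count q.1 : Int)) := by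
    rw [show row.2.1.keys = row.2.1.items.map Prod.fst from rfl, List.map_map]
    rfl
  rw [hkeys] at hL
  have h2 : row.2.1.items.map (fun q => (p.2.count q.1 : Int))
      = row.2.1.items.map (fun q => q.2 - min (M.getD q.1 0) q.2) := by
    apply List.map_congr_left
    intro q hq
    have hg : row.2.1.getD q.1 0 = q.2 := PySem.Dict.getD_of_mem_items row.2.1 hq hnd 0
    rw [hcnt q.1, hg]
  rw [h2, sum_map_sub] at hL
  unfold degOf
  rw [hL, hlen]

-- ---- the shared static counter construction ----
theorem counter_spec (l : List Int) :
    ((l.foldl (fun c v => c.insert v (c.getD v 0 + 1)) (PySem.Dict.empty : PySem.Dict Int Int)).keys.Nodup)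
    ∧ (∀ v : Int, (l.foldl (fun c v => c.insert v (c.getD v 0 + 1)) (PySem.Dict.empty : PySem.Dict Int Int)).getD v 0
        = (l.count v : Int))
    ∧ (l.length : Int)
        = ((l.foldl (fun c v => c.insert v (c.getD v 0 + 1)) (PySem.Dict.empty : PySem.Dict Int Int)).items.map Prod.snd).sum := by
  set c := l.foldl (fun c v => c.insert v (c.getD v 0 + 1)) (PySem.Dict.empty : PySem.Dict Int Int) with hc
  have hnd : c.keys.Nodup := by
    rw [hc]
    exact PySem.Dict.nodup_keys_foldl_insert l (fun c v => c.getD v 0 + 1) PySem.Dict.empty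
      (by simp [PySem.Dict.keys_empty])
  have hgetD : ∀ v : Int, c.getD v 0 = (l.count v : Int) := by
    intro v
    rw [hc, PySem.Dict.getD_foldl_insert_add_one l PySem.Dict.empty v]
    simp [PySem.Dict.getD_empty]
  refine ⟨hnd, hgetD, ?_⟩
  have hsupp : ∀ x ∈ l, x ∈ c.keys := by
    intro x hx
    have hxc : 0 < l.count x := List.count_pos_iff.mpr hx
    by_contra hmem
    have := getD_zero_of_not_mem_keys c x hmem
    rw [hgetD x] at this
    omega
  have hL := len_sum l c.keys hnd hsupp
  have hkeys : c.keys.map (fun v => (l.count v : Int))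
      = c.items.map (fun q => (l.count q.1 : Int)) := by
    rw [show c.keys = c.items.map Prod.fst from rfl, List.map_map]
    rfl
  rw [hkeys] at hL
  have h2 : c.items.map (fun q => (l.count q.1 : Int)) = c.items.map Prod.snd := by
    apply List.map_congr_left
    intro q hq
    have hg : c.getD q.1 0 = q.2 := PySem.Dict.getD_of_mem_items c hq hnd 0
    rw [← hg, hgetD q.1]
  rw [h2] at hL
  exact hL

-- ---- the initial rows are related to the initial dict under M = {} ----
theorem init_rel (ug : List (Int × List Int)) :
    List.Forall₂ (RelM PySem.Dict.empty) (PySem.Dict.ofList ug).items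
      ((PySem.Dict.ofList ug).items.map rowOf) := by
  rw [List.forall₂_map_right_iff, List.forall₂_same]
  intro p _
  obtain ⟨hnd, hgetD, hlen⟩ := counter_spec p.2
  unfold RelM RowInv rowOf
  refine ⟨rfl, ⟨hnd, fun v => ?_, hlen⟩, fun v => ?_⟩
  · rw [hgetD v]
    omega
  · rw [hgetD v, PySem.Dict.getD_empty]
    have : (0 : Int) ≤ (p.2.count v : Int) := by omega
    omega

-- ---- the max-merge fold, characterized ----
theorem foldMax (F : Int → Int) :
    ∀ (I : List (Int × Int)) (M : PySem.Dict Int Int),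
      (∀ p ∈ I, p.2 = F p.1) → (I.map Prod.fst).Nodup →
      ∀ v : Int,
        (I.foldl (fun m p => if p.2 > m.getD p.1 0 then m.insert p.1 p.2 else m) M).getD v 0
          = if v ∈ I.map Prod.fst then max (M.getD v 0) (F v) else M.getD v 0 := by
  intro I
  induction I with
  | nil => intro M _ _ v; simp
  | cons p I ih =>
    intro M hF hnd v
    have hp2 : p.2 = F p.1 := hF p List.mem_cons_self
    have hndI : (I.map Prod.fst).Nodup := (List.nodup_cons.mp (by simpa using hnd)).2
    have hfresh : p.1 ∉ I.map Prod.fst := (List.nodup_cons.mp (by simpa using hnd)).1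
    simp only [List.foldl_cons]
    set M1 := if p.2 > M.getD p.1 0 then M.insert p.1 p.2 else M with hM1
    have hstep : ∀ w : Int,
        M1.getD w 0 = if w = p.1 then max (M.getD p.1 0) (F p.1) else M.getD w 0 := by
      intro w
      rw [hM1]
      by_cases hlt : p.2 > M.getD p.1 0
      · rw [if_pos hlt, PySem.Dict.getD_insert]
        by_cases hw : w = p.1
        · rw [if_pos hw, if_pos hw]
          rw [hp2] at hlt ⊢
          omega
        · rw [if_neg hw, if_neg hw]
      · rw [if_neg hlt]
        by_cases hw : w = p.1
        · rw [if_pos hw, hw]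
          rw [hp2] at hlt
          omega
        · rw [if_neg hw]
    rw [ih M1 (fun q hq => hF q (List.mem_cons_of_mem _ hq)) hndI v]
    by_cases hvI : v ∈ I.map Prod.fst
    · have hvp : v ≠ p.1 := fun h => hfresh (h ▸ hvI)
      rw [if_pos hvI, if_pos (show v ∈ (p :: I).map Prod.fst by simp [hvI]), hstep v, if_neg hvp]
    · rw [if_neg hvI, hstep v]
      by_cases hvp : v = p.1
      · rw [if_pos hvp, if_pos (show v ∈ (p :: I).map Prod.fst by simp [hvp]), hvp]
      · rw [if_neg hvp, if_neg (show ¬ v ∈ (p :: I).map Prod.fst by simp [hvI, hvp])]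

theorem mergeM_getD (M : PySem.Dict Int Int) (u : Int) (cu : PySem.Dict Int Int)
    (hnd : cu.keys.Nodup) (hM : MNonneg M) (_hc : ∀ v : Int, 0 ≤ cu.getD v 0) (v : Int) :
    (mergeM M u cu).getD v 0
      = (if v = u then 1 else 0) + max (M.getD v 0) (cu.getD v 0) := by
  have hF : ∀ p ∈ cu.items, p.2 = (fun k => cu.getD k 0) p.1 :=
    fun p hp => (PySem.Dict.getD_of_mem_items cu hp hnd 0).symm
  have hMax : ∀ w : Int,
      (cu.items.foldl (fun m p => if p.2 > m.getD p.1 0 then m.insert p.1 p.2 else m) M).getD w 0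
        = max (M.getD w 0) (cu.getD w 0) := by
    intro w
    rw [foldMax (fun k => cu.getD k 0) cu.items M hF hnd w]
    by_cases hw : w ∈ cu.items.map Prod.fst
    · rw [if_pos hw]
    · rw [if_neg hw]
      have h0 : cu.getD w 0 = 0 := getD_zero_of_not_mem_keys cu w hw
      have := hM w
      rw [h0]
      omega
  unfold mergeM
  rw [PySem.Dict.getD_insert]
  by_cases hv : v = u
  · rw [if_pos hv, if_pos hv, hMax u, hv]
    ring
  · rw [if_neg hv, if_neg hv, hMax v]
    ring

-- ---- the two argmax scans pick related elements ----
theorem pick_spec (M : PySem.Dict Int Int) (hM : MNonneg M) :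
    ∀ (xs : List (Int × List Int)) (ys : List (Int × PySem.Dict Int Int × Int)),
      List.Forall₂ (RelM M) xs ys →
      ∀ (p : Int × List Int) (row : Int × PySem.Dict Int Int × Int), RelM M p row →
      ∃ q, (q = p ∨ q ∈ xs) ∧ RelM M q (ys.foldl (fun b r => if degOf M r > degOf M b then r else b) row) ∧
        xs.foldl (fun s t => if ((t.2.length : Int)) > s.2 then (t.1, ((t.2.length : Int))) else s)
          (p.1, ((p.2.length : Int))) = (q.1, ((q.2.length : Int))) := by
  intro xs ys hF
  induction hF with
  | nil => intro p row h; exact ⟨p, Or.inl rfl, h, rfl⟩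
  | @cons x y xs ys hxy hF ih =>
    intro p row h
    simp only [List.foldl_cons]
    by_cases hgt : ((x.2.length : Int)) > ((p.2.length : Int))
    · have hgt' : degOf M y > degOf M row := by
        rw [← deg_eq M x y hM hxy, ← deg_eq M p row hM h]
        exact hgt
      rw [if_pos hgt, if_pos hgt']
      obtain ⟨q, hqmem, hrel, hfold⟩ := ih x y hxy
      exact ⟨q, Or.inr (hqmem.elim (fun e => e ▸ List.mem_cons_self) (List.mem_cons_of_mem _)),
        hrel, hfold⟩
    · have hgt' : ¬ degOf M y > degOf M row := by
        rw [← deg_eq M x y hM hxy, ← deg_eq M p row hM h]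
        exact hgt
      rw [if_neg hgt, if_neg hgt']
      obtain ⟨q, hqmem, hrel, hfold⟩ := ih p row h
      exact ⟨q, hqmem.elim Or.inl (fun hq => Or.inr (List.mem_cons_of_mem _ hq)), hrel, hfold⟩

-- ---- Forall₂ passes through A's filter-and-map against B's plain filter ----
theorem forall2_filter_mapA {α β α' : Type} (R : α → β → Prop) (R' : α' → β → Prop)
    (pA : α → Bool) (pB : β → Bool) (fA : α → α')
    (hp : ∀ a b, R a b → pA a = pB b)
    (hf : ∀ a b, R a b → pB b = true → R' (fA a) b) :
    ∀ {xs : List α} {ys : List β}, List.Forall₂ R xs ys →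
      List.Forall₂ R' ((xs.filter pA).map fA) (ys.filter pB) := by
  intro xs ys hF
  induction hF with
  | nil => simp only [List.filter_nil, List.map_nil]; exact List.Forall₂.nil
  | @cons x y xs ys hxy hF ih =>
    rw [List.filter_cons, List.filter_cons, hp x y hxy]
    by_cases hb : pB y = true
    · simp only [hb, if_pos, List.map_cons]
      exact List.Forall₂.cons (hf x y hxy hb) ih
    · simp only [hb, if_neg, Bool.false_eq_true, not_false_iff]
      exact ih

-- ---- A's round, characterized as a filter-and-map of the items ----
theorem roundA_items (d : PySem.Dict Int (List Int)) (u : Int) :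
    (roundA d u).items
      = (d.items.filter (fun p => !(((d.getD u []) ++ [u]).contains p.1))).map
          (fun p => (p.1, ((d.getD u []) ++ [u]).foldl remOneA p.2)) := by
  unfold roundA
  rw [foldA_items]
  have herase : (d.erase u).items = d.items.filter (fun p => !(p.1 == u)) := rfl
  rw [herase, List.filter_filter]
  apply congrArg (List.map _)
  apply List.filter_congr
  intro p _
  cases hRL : ((d.getD u []) ++ [u]).contains p.1 with
  | true => simp
  | false =>
    have hne : p.1 ≠ u := by
      intro hpu
      have hmem : u ∈ (d.getD u []) ++ [u] := by simp
      have := List.contains_iff_mem.mpr hmem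
      rw [hpu] at hRL
      rw [this] at hRL
      cases hRL
    simp [hne]

-- ---- membership in the removal list, phrased via the counter and M ----
theorem RL_contains_iff (M : PySem.Dict Int Int) (hM : MNonneg M)
    (q : Int × List Int) (b : Int × PySem.Dict Int Int × Int) (hq : RelM M q b) (v : Int) :
    (q.2 ++ [q.1]).contains v = true
      ↔ (v = q.1 ∨ M.getD v 0 < b.2.1.getD v 0) := by
  rw [List.contains_iff_mem, List.mem_append, List.mem_singleton]
  have hcnt := hq.2.2 v
  have hnn := hq.2.1.2.1 v
  have hMv := hM v
  constructor
  · rintro (h | h)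
    · right
      have : 0 < q.2.count v := List.count_pos_iff.mpr h
      omega
    · exact Or.inl h
  · rintro (h | h)
    · exact Or.inr h
    · left
      apply List.count_pos_iff.mp
      omega

-- ---- one survivor keeps the relation under the merged cap ----
theorem survive_rel (M : PySem.Dict Int Int) (hM : MNonneg M)
    (q : Int × List Int) (b : Int × PySem.Dict Int Int × Int) (hq : RelM M q b)
    (p : Int × List Int) (row : Int × PySem.Dict Int Int × Int) (h : RelM M p row) :
    RelM (mergeM M b.1 b.2.1) (p.1, (q.2 ++ [q.1]).foldl remOneA p.2) row := by
  obtain ⟨h1, hInv, hcnt⟩ := h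
  refine ⟨h1, hInv, ?_⟩
  intro v
  show (((q.2 ++ [q.1]).foldl remOneA p.2).count v : Int)
      = row.2.1.getD v 0 - min ((mergeM M b.1 b.2.1).getD v 0) (row.2.1.getD v 0)
  rw [count_foldG]
  have hmg := mergeM_getD M b.1 b.2.1 hq.2.1.1 hM hq.2.1.2.1 v
  have hRcount : (q.2 ++ [q.1]).count v = q.2.count v + (if v = q.1 then 1 else 0) := by
    rw [List.count_append]
    by_cases hv : v = q.1
    · simp [hv]
    · simp [hv, Ne.symm hv]
  have hA := hcnt v
  have hB := hq.2.2 v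
  have hnnc := hInv.2.1 v
  have hnnb := hq.2.1.2.1 v
  have hMv := hM v
  rw [hmg]
  simp only [hq.1]
  rw [hRcount]
  split_ifs with hv <;> omega

-- ---- nonnegativity of the merged cap ----
theorem mergeM_nonneg (M : PySem.Dict Int Int) (u : Int) (cu : PySem.Dict Int Int)
    (hnd : cu.keys.Nodup) (hM : MNonneg M) (hc : ∀ v : Int, 0 ≤ cu.getD v 0) :
    MNonneg (mergeM M u cu) := by
  intro v
  rw [mergeM_getD M u cu hnd hM hc v]
  have h1 := hM v
  have h2 := hc v
  by_cases hv : v = u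
  · rw [if_pos hv]
    omega
  · rw [if_neg hv]
    omega

theorem main_goAB :
    ∀ (n : Nat) (d : PySem.Dict Int (List Int)) (rows : List (Int × PySem.Dict Int Int × Int))
      (M : PySem.Dict Int Int),
      d.items.length ≤ n → d.keys.Nodup → MNonneg M → List.Forall₂ (RelM M) d.items rows →
      goA d = goB rows M := by
  intro n
  induction n with
  | zero =>
    intro d rows M hlen hnd hM hF
    have hitems : d.items = [] := List.eq_nil_of_length_eq_zero (Nat.le_zero.mp hlen)
    have hrows : rows = [] := by
      rw [hitems] at hF
      exact List.forall₂_nil_left_iff.mp hF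
    rw [hrows, goA, dif_pos (by rw [metadataA_eq]; simp [PySem.Dict.keys, hitems])]
    simp [goB]
  | succ n ih =>
    intro d rows M hlen hnd hM hF
    by_cases hitems : d.items = []
    · have hrows : rows = [] := by
        rw [hitems] at hF
        exact List.forall₂_nil_left_iff.mp hF
      rw [hrows, goA, dif_pos (by rw [metadataA_eq]; simp [PySem.Dict.keys, hitems])]
      simp [goB]
    · obtain ⟨p0, items', heq⟩ := List.exists_cons_of_ne_nil hitems
      rcases rows with _ | ⟨row0, rest⟩
      · rw [heq] at hF; cases hF
      obtain ⟨hrel0, hFrest⟩ : RelM M p0 row0 ∧ List.Forall₂ (RelM M) items' rest := by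
        rw [heq] at hF
        exact List.forall₂_cons.mp hF
      have hkeysne : (metadataA d).1 ≠ [] := by
        rw [metadataA_eq]
        simp [PySem.Dict.keys, heq]
      have hmd2 : (metadataA d).2.items = d.items.map (fun p => (p.1, ((p.2.length : Int)))) := by
        rw [metadataA_eq]
        have hfresh := PySem.Dict.items_foldl_insert_fresh d.items Prod.fst
          (fun p => ((p.2.length : Int))) PySem.Dict.empty
          (fun a _ => by simp [PySem.Dict.contains_empty]) hnd
        simpa using hfresh
      obtain ⟨q, hqmem, hrelq, hfold⟩ := pick_spec M hM items' rest hFrest p0 row0 hrel0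
      have hqitems : q ∈ d.items := by
        rw [heq]
        rcases hqmem with rfl | hq
        · exact List.mem_cons_self
        · exact List.mem_cons_of_mem _ hq
      -- A's chosen node is q.1
      have hu : pyMaxByVal (metadataA d).2.items = q.1 := by
        rw [hmd2, heq, List.map_cons]
        simp only [pyMaxByVal]
        rw [List.foldl_map]
        have : (items'.foldl
            (fun (best : Int × Int) (t : Int × List Int) =>
              if ((t.1, ((t.2.length : Int))) : Int × Int).2 > best.2
              then ((t.1, ((t.2.length : Int))) : Int × Int) else best)
            (p0.1, ((p0.2.length : Int)))) = (q.1, ((q.2.length : Int))) := hfold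
        rw [show (fun (best : Int × Int) (t : Int × List Int) =>
              if ((t.1, ((t.2.length : Int))) : Int × Int).2 > best.2
              then ((t.1, ((t.2.length : Int))) : Int × Int) else best)
            = (fun (s : Int × Int) (t : Int × List Int) =>
              if ((t.2.length : Int)) > s.2 then (t.1, ((t.2.length : Int))) else s) from rfl] at this
        rw [this]
      have hb1 : (bestOf M row0 rest).1 = q.1 := hrelq.1
      have hgetD : d.getD q.1 [] = q.2 := by
        have hmemq : (q.1, q.2) ∈ d.items := by simpa using hqitems
        exact PySem.Dict.getD_of_mem_items d hmemq hnd []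
      have hAitems : (roundA d q.1).items
          = (d.items.filter (fun p => !((q.2 ++ [q.1]).contains p.1))).map
              (fun p => (p.1, (q.2 ++ [q.1]).foldl remOneA p.2)) := by
        rw [roundA_items d q.1, hgetD]
      set b := bestOf M row0 rest with hbdef
      have hFnew : List.Forall₂ (RelM (mergeM M b.1 b.2.1)) (roundA d q.1).items
          ((row0 :: rest).filter
            (fun r => r.1 != b.1 && decide (b.2.1.getD r.1 0 ≤ M.getD r.1 0))) := by
        rw [hAitems]
        refine forall2_filter_mapA (RelM M) (RelM (mergeM M b.1 b.2.1)) _ _ _ ?hp ?hf hF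
        case hp =>
          intro a r har
          have hr1 : r.1 = a.1 := har.1
          have hiff := RL_contains_iff M hM q b hrelq a.1
          by_cases hm : (q.2 ++ [q.1]).contains a.1 = true
          · rw [hm]
            rcases hiff.mp hm with h | h
            · have : (r.1 != b.1) = false := by
                simp [hr1, hb1, h]
              simp [this]
            · have : decide (b.2.1.getD r.1 0 ≤ M.getD r.1 0) = false := by
                simp [hr1]
                omega
              simp [this]
          · have hm' : (q.2 ++ [q.1]).contains a.1 = false := by
              cases hc : (q.2 ++ [q.1]).contains a.1
              · rfl
              · exact absurd hc hm
            rw [hm']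
            have hno : ¬(a.1 = q.1 ∨ M.getD a.1 0 < b.2.1.getD a.1 0) := fun hh => hm (hiff.mpr hh)
            rw [not_or] at hno
            have e1 : (r.1 != b.1) = true := by
              simp [hr1, hb1]
              exact hno.1
            have e2 : decide (b.2.1.getD r.1 0 ≤ M.getD r.1 0) = true := by
              simp [hr1]
              omega
            simp [e1, e2]
        case hf =>
          intro a r har _
          exact survive_rel M hM q b hrelq a r har
      have hqkeys : q.1 ∈ d.keys := List.mem_map_of_mem hqitems
      have hlt : (roundA d q.1).items.length < d.items.length := roundA_lt d q.1 hqkeys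
      have hndnew : (roundA d q.1).keys.Nodup := by
        show ((roundA d q.1).items.map Prod.fst).Nodup
        rw [hAitems, List.map_map]
        have hsub : ((d.items.filter (fun p => !((q.2 ++ [q.1]).contains p.1))).map
            (Prod.fst ∘ (fun p : Int × List Int => (p.1, (q.2 ++ [q.1]).foldl remOneA p.2)))).Sublist
            (d.items.map Prod.fst) := (List.filter_sublist).map _
        exact hsub.nodup hnd
      have hMnew : MNonneg (mergeM M b.1 b.2.1) :=
        mergeM_nonneg M b.1 b.2.1 hrelq.2.1.1 hM hrelq.2.1.2.1
      rw [hb1] at hFnew hMnew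
      rw [goA, dif_neg hkeysne, hu]
      show q.1 :: goA (roundA d q.1) = goB (row0 :: rest) M
      rw [goB]
      rw [← hbdef, hb1]
      congr 1
      exact ih (roundA d q.1) _ (mergeM M q.1 b.2.1)
        (by omega) hndnew hMnew hFnew

-- ===== VERDICT (by name: the statement is the Claim_ definition above) =====
theorem findSeedNodes_spec : Claim_equal_findSeedNodes := by
  intro ug _
  unfold Spec_findSeedNodes findSeedNodes findSeedNodes_alt
  exact main_goAB (PySem.Dict.ofList ug).items.length (PySem.Dict.ofList ug) _ PySem.Dict.empty
    le_rfl (PySem.Dict.nodup_keys_ofList ug) (fun v => by simp [PySem.Dict.getD_empty]) (init_rel ug)
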